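-- pv_equiv track=rewrite | github.com/CodeForCheck/BMM | code/create_bert_sample.py | get_sub_token
-- ===== SOURCE A (Python) =====
-- special_ch=['all_token','null','*','[','(',')',':','-',']','_',',','+']
--
-- def get_sub_token(token_s):
--     t=''
--     sub_token_list=[]
--     for ch in token_s:
--         if ch not in special_ch:
--             t = t+ch
--         else:
--             if len(t)>0:
--                 sub_token_list.append(t)
--             sub_token_list.append(ch)
--             t=''
--     if len(t)>0:
--         sub_token_list.append(t)
--     return sub_token_list
-- ===== SOURCE B (Python) =====
-- SPECIALS = set('*[():-]_,+')
--
-- def get_sub_token(token_s):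
--     # build the chunk list back-to-front: each delimiter becomes its own chunk,
--     # a plain character is merged into the following text chunk.
--     # rev holds the chunks in reverse order; text chunks are kept as reversed
--     # char lists so merging a character is an O(1) append; joined once at the end.
--     rev = []
--     for ch in reversed(token_s):
--         if ch in SPECIALS:
--             rev.append([ch])
--         elif rev and not (len(rev[-1]) == 1 and rev[-1][0] in SPECIALS):
--             rev[-1].append(ch)
--         else:
--             rev.append([ch])
--     return [''.join(reversed(c)) for c in reversed(rev)]
-- ===== Notes on version B (the rewrite author's own statement) =====
-- stated objective: alternative
-- what changed: Instead of A's forward scan with a pending-text accumulator flushed at each delimiter, B builds the chunk list back-to-front, prepending each delimiter as its own chunk and merging a plain character into the following text chunk.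
import Mathlib
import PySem

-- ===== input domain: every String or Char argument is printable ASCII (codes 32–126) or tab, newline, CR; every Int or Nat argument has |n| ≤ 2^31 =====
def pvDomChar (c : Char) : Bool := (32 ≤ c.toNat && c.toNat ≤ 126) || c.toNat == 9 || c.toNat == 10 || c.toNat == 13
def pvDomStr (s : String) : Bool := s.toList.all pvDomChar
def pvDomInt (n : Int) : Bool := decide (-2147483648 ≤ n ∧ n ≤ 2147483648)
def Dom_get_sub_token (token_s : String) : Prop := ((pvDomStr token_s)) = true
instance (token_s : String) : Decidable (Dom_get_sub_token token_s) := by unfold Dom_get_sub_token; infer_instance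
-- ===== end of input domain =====

-- B replaces A's forward accumulator-and-flush scan by a back-to-front pass that merges each
-- character into the following chunk (objective: alternative decomposition; same cost).

-- ===== PORT A =====
-- A tests the 1-char string ch for membership in
-- special_ch = ['all_token','null','*','[','(',')',':','-',']','_',',','+'];
-- the two multi-char entries can never equal a 1-char string, so the test is exactly
-- membership of the character in the ten 1-char entries (exact).
def pvSpecials : List Char := ['*', '[', '(', ')', ':', '-', ']', '_', ',', '+']

-- the loop body over the state (t, sub_token_list); strings are kept as List Char
def aStep (st : List Char × List (List Char)) (ch : Char) : List Char × List (List Char) :=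
  if ¬ (ch ∈ pvSpecials) then
    (st.1 ++ [ch], st.2)
  else
    ([], (if st.1.length > 0 then st.2 ++ [st.1] else st.2) ++ [[ch]])

-- the trailing `if len(t)>0: sub_token_list.append(t)` after the loop
def aFinish (st : List Char × List (List Char)) : List (List Char) :=
  if st.1.length > 0 then st.2 ++ [st.1] else st.2

def get_sub_token (token_s : String) : List String :=
  (aFinish (token_s.toList.foldl aStep ([], []))).map String.ofList

-- ===== PORT B =====
-- body of B's `for ch in reversed(token_s)` loop. B's rev is a Python list appended at the
-- end; here it is represented most-recent-chunk-first (cons = append), so rev[-1] is the head.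
-- Python's test `len(rev[-1]) == 1 and rev[-1][0] in SPECIALS` says exactly that the chunk is
-- one of the ten singleton delimiter chunks, written here as membership in their list (exact).
-- Text chunks are kept as reversed char lists (B appends, O(1)), reversed once at the end.
def altStep (rev : List (List Char)) (ch : Char) : List (List Char) :=
  if ch ∈ pvSpecials then [ch] :: rev
  else
    match rev with
    | r0 :: rs =>
        if ¬ (r0 ∈ pvSpecials.map (fun c => [c])) then (r0 ++ [ch]) :: rs
        else [ch] :: r0 :: rs
    | [] => [[ch]]

-- `[''.join(reversed(c)) for c in reversed(rev)]`: our rev is already in final chunk order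
def get_sub_token_alt (token_s : String) : List String :=
  (token_s.toList.reverse.foldl altStep []).map (fun c => String.ofList c.reverse)

-- ===== PRECONDITION & SPEC =====
def Spec_get_sub_token (token_s : String) (out : List String) : Prop := out = get_sub_token_alt token_s
instance (token_s : String) (out : List String) : Decidable (Spec_get_sub_token token_s out) := by unfold Spec_get_sub_token; infer_instance

-- ===== CLAIM (what is proved, stated in full; the proofs are below) =====
def Claim_equal_get_sub_token : Prop := ∀ (token_s : String), Dom_get_sub_token token_s → Spec_get_sub_token token_s (get_sub_token token_s)

-- ===== LEMMAS AND PROOFS =====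

-- B's step with the chunks un-reversed (proof vehicle only)
def mStep (ch : Char) (res : List (List Char)) : List (List Char) :=
  if ch ∈ pvSpecials then [ch] :: res
  else
    match res with
    | r0 :: rs =>
        if ¬ (r0 ∈ pvSpecials.map (fun c => [c])) then (ch :: r0) :: rs
        else [ch] :: r0 :: rs
    | [] => [[ch]]

-- merging a pending text prefix t into an already-built chunk list
def pvMerge (t : List Char) (r : List (List Char)) : List (List Char) :=
  if t = [] then r
  else
    match r with
    | r0 :: rs => if ¬ (r0 ∈ pvSpecials.map (fun c => [c])) then (t ++ r0) :: rs else t :: r0 :: rs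
    | [] => [t]

theorem cons_not_delim_chunk {ch : Char} (h : ch ∉ pvSpecials) (r0 : List Char) :
    (ch :: r0) ∉ pvSpecials.map (fun c => [c]) := by
  simp only [List.mem_map]
  rintro ⟨c, hc, hEq⟩
  have : c = ch := by
    have := hEq.symm
    simp only [List.cons.injEq] at this
    exact this.1.symm
  exact h (this ▸ hc)

theorem reverse_mem_delim_chunks (r0 : List Char) :
    (r0.reverse ∈ pvSpecials.map (fun c => [c])) ↔ (r0 ∈ pvSpecials.map (fun c => [c])) := by
  simp only [List.mem_map]
  constructor
  · rintro ⟨c, hc, hEq⟩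
    exact ⟨c, hc, by simpa using congrArg List.reverse hEq⟩
  · rintro ⟨c, hc, hEq⟩
    exact ⟨c, hc, by simp [← hEq]⟩

-- B's reversed-chunk fold computes the mStep fold with every chunk reversed
theorem alt_eq_mStep (cs : List Char) :
    cs.reverse.foldl altStep [] = (cs.foldr mStep []).map List.reverse := by
  rw [List.foldl_reverse]
  induction cs with
  | nil => rfl
  | cons ch cs ih =>
      simp only [List.foldr_cons, ih]
      by_cases h : ch ∈ pvSpecials
      · simp [altStep, mStep, h]
      · cases hR : cs.foldr mStep [] with
        | nil => simp [altStep, mStep, h]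
        | cons r0 rs =>
            by_cases h0 : r0 ∈ pvSpecials.map (fun c => [c])
            · simp [altStep, mStep, h, h0, reverse_mem_delim_chunks]
            · simp [altStep, mStep, h, h0, reverse_mem_delim_chunks]

theorem pvMerge_snoc (ch : Char) (h : ch ∉ pvSpecials) (t : List Char) (r : List (List Char)) :
    pvMerge (t ++ [ch]) r = pvMerge t (mStep ch r) := by
  have hs : ([ch] : List Char) ∉ pvSpecials.map (fun c => [c]) := cons_not_delim_chunk h []
  cases r with
  | nil =>
      cases t <;> simp [pvMerge, mStep, h, hs]
  | cons r0 rs =>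
      by_cases h0 : r0 ∈ pvSpecials.map (fun c => [c])
      · cases t <;> simp [pvMerge, mStep, h, h0, hs]
      · have hcons := cons_not_delim_chunk h r0
        cases t <;> simp [pvMerge, mStep, h, h0, hcons]

theorem loop_eq (cs : List Char) : ∀ (t : List Char) (acc : List (List Char)),
    aFinish (cs.foldl aStep (t, acc)) = acc ++ pvMerge t (cs.foldr mStep []) := by
  induction cs with
  | nil =>
      intro t acc
      cases t <;> simp [aFinish, pvMerge]
  | cons ch cs ih =>
      intro t acc
      by_cases h : ch ∈ pvSpecials
      · have step : aStep (t, acc) ch = ([], (if t.length > 0 then acc ++ [t] else acc) ++ [[ch]]) := by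
          simp [aStep, h]
        rw [List.foldl_cons, step, ih]
        have hmem : ([ch] : List Char) ∈ pvSpecials.map (fun c => [c]) :=
          List.mem_map.mpr ⟨ch, h, rfl⟩
        rw [List.foldr_cons, show mStep ch (cs.foldr mStep []) = [ch] :: cs.foldr mStep []
              from by simp [mStep, h]]
        cases t <;> simp [pvMerge, hmem]
      · have step : aStep (t, acc) ch = (t ++ [ch], acc) := by simp [aStep, h]
        rw [List.foldl_cons, step, ih, List.foldr_cons, pvMerge_snoc ch h]

-- ===== VERDICT (by name: the statement is the Claim_ definition above) =====
theorem get_sub_token_spec : Claim_equal_get_sub_token := by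
  intro s _
  unfold Spec_get_sub_token get_sub_token get_sub_token_alt
  rw [loop_eq s.toList [] [], alt_eq_mStep, List.map_map]
  simp [pvMerge, Function.comp]
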